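-- pv_equiv track=rewrite | github.com/bjtuxuyi/MEHD | HY/BatchSTProcess.py | generate_index_list
-- ===== SOURCE A (Python) =====
-- def generate_index_list(no_operation_train_index,eventnum_in_trains):
--     count = 0
--     index_list = []
--     for i, eventnum_in_train in enumerate(eventnum_in_trains):
--         if i not in no_operation_train_index:
--             sub_index_list = []
--             for k,j in enumerate(range(eventnum_in_train)):
--                 if k != eventnum_in_train-1:
--                     sub_index_list.append(count)
--                 count = count + 1
--             index_list.append(sub_index_list)
--         else:
--             count = count + eventnum_in_train
--     a = [index for indexs in index_list for index in indexs]
--     return a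
-- ===== SOURCE B (Python) =====
-- def generate_index_list(no_operation_train_index, eventnum_in_trains):
--     skip = set(no_operation_train_index)
--     out = []
--     count = 0
--     for i, e in enumerate(eventnum_in_trains):
--         if i in skip:
--             count += e
--         else:
--             events = range(count, count + e)
--             out.extend(events[:-1])
--             count += len(events)
--     return out
-- ===== Notes on version B (the rewrite author's own statement) =====
-- stated objective: faster
-- what changed: Replaces the per-event inner loop with one range of global event indices per train (extended minus its last element) and the O(m) list membership test with a precomputed set, so each train costs O(1) plus its output size.
import Mathlib
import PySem

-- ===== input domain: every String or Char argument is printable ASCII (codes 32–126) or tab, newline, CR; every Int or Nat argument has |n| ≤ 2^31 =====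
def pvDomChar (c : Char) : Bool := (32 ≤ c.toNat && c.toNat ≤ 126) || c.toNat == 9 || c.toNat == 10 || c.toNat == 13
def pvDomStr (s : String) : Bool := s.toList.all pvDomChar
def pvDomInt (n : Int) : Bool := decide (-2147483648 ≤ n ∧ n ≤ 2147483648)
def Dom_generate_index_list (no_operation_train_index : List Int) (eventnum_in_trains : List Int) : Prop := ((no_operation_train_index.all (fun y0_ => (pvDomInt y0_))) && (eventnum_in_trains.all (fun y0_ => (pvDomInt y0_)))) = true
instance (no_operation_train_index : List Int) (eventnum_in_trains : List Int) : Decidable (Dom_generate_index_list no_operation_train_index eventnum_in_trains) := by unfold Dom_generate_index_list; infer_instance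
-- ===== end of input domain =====

-- B replaces A's per-event inner loop by one range of global event indices per train
-- (emitted minus its last element) and A's O(m) list membership test by a precomputed set;
-- the two are proved equal on all inputs.

-- ===== PORT A =====
def generate_index_list (no_operation_train_index : List Int) (eventnum_in_trains : List Int) : List Int :=
  -- for i, eventnum_in_train in enumerate(eventnum_in_trains): state (count, index_list)
  let st := (PySem.List.enumerate eventnum_in_trains 0).foldl
    (fun (st : Int × List (List Int)) (p : Int × Int) =>
      let count := st.1
      let index_list := st.2
      let i := p.1
      let e := p.2
      if ¬ (i ∈ no_operation_train_index) then
        -- for k, j in enumerate(range(eventnum_in_train)): state (count, sub_index_list)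
        let inner := (PySem.List.enumerate (PySem.List.pyRange 0 e 1) 0).foldl
          (fun (st2 : Int × List Int) (kj : Int × Int) =>
            (st2.1 + 1, if kj.1 ≠ e - 1 then st2.2 ++ [st2.1] else st2.2))
          (count, [])
        (inner.1, index_list ++ [inner.2])
      else
        (count + e, index_list))
    (0, [])
  -- a = [index for indexs in index_list for index in indexs]
  st.2.flatMap id

-- ===== PORT B =====
def generate_index_list_alt (no_operation_train_index : List Int) (eventnum_in_trains : List Int) : List Int :=
  let skip := PySem.Set.ofList no_operation_train_index
  let st := (PySem.List.enumerate eventnum_in_trains 0).foldl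
    (fun (st : Int × List Int) (p : Int × Int) =>
      let count := st.1
      let out := st.2
      let i := p.1
      let e := p.2
      if PySem.Set.contains skip i then
        (count + e, out)
      else
        -- events = range(count, count + e); out.extend(events[:-1]); count += len(events)
        let events := PySem.List.pyRange count (count + e) 1
        (count + events.length, out ++ events.dropLast))
    (0, [])
  st.2

-- ===== PRECONDITION & SPEC =====
def Spec_generate_index_list (no_operation_train_index : List Int) (eventnum_in_trains : List Int) (out : List Int) : Prop := out = generate_index_list_alt no_operation_train_index eventnum_in_trains
instance (no_operation_train_index : List Int) (eventnum_in_trains : List Int) (out : List Int) : Decidable (Spec_generate_index_list no_operation_train_index eventnum_in_trains out) := by unfold Spec_generate_index_list; infer_instance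

-- ===== CLAIM (what is proved, stated in full; the proofs are below) =====
def Claim_equal_generate_index_list : Prop := ∀ (no_operation_train_index : List Int) (eventnum_in_trains : List Int), Dom_generate_index_list no_operation_train_index eventnum_in_trains → Spec_generate_index_list no_operation_train_index eventnum_in_trains (generate_index_list no_operation_train_index eventnum_in_trains)

-- ===== LEMMAS AND PROOFS =====

-- enumerate of a unit-step range starting at its own start pairs each element with itself
theorem pv_enum_pyRange_aux (n : Nat) : ∀ (a b : Int), (b - a).toNat = n →
    PySem.List.enumerate (PySem.List.pyRange a b 1) a
      = (PySem.List.pyRange a b 1).map (fun k => (k, k)) := by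
  induction n with
  | zero =>
    intro a b h
    rw [PySem.List.pyRange_one_eq_nil (by omega)]
    simp [PySem.List.enumerate]
  | succ n ih =>
    intro a b h
    rw [PySem.List.pyRange_one_cons (by omega)]
    simp [PySem.List.enumerate_cons]
    exact ih (a+1) b (by omega)

-- a fold over elements that all pass the test appends a contiguous run
theorem pv_fold_all (t : Int) (l : List Int) (h : ∀ k ∈ l, k ≠ t) :
    ∀ (count : Int) (acc : List Int),
      (l.map (fun k => (k, k))).foldl
        (fun (st2 : Int × List Int) (kj : Int × Int) =>
          (st2.1 + 1, if kj.1 ≠ t then st2.2 ++ [st2.1] else st2.2))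
        (count, acc)
      = (count + l.length, acc ++ PySem.List.pyRange count (count + l.length) 1) := by
  induction l with
  | nil =>
    intro count acc
    simp
  | cons k l ih =>
    intro count acc
    simp only [List.map_cons, List.foldl_cons]
    rw [if_pos (h k (by simp))]
    rw [ih (fun k hk => h k (by simp [hk])) (count + 1) (acc ++ [count])]
    have : PySem.List.pyRange count (count + (l.length + 1 : Nat)) 1
        = count :: PySem.List.pyRange (count + 1) (count + (l.length + 1 : Nat)) 1 := by
      refine PySem.List.pyRange_one_cons ?_
      push_cast; omega
    simp only [List.length_cons, this]
    have h2 : count + 1 + (l.length : Int) = count + ((l.length : Int) + 1) := by ring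
    rw [Prod.ext_iff]
    refine ⟨by push_cast; ring, by rw [h2]; push_cast; simp⟩

-- A's inner loop computes range(count, count+e-1) and advances count by len(range(e))
theorem pv_inner (e : Int) (count : Int) :
    (PySem.List.enumerate (PySem.List.pyRange 0 e 1) 0).foldl
      (fun (st2 : Int × List Int) (kj : Int × Int) =>
        (st2.1 + 1, if kj.1 ≠ e - 1 then st2.2 ++ [st2.1] else st2.2))
      (count, [])
    = (count + max e 0, PySem.List.pyRange count (count + e - 1) 1) := by
  rw [pv_enum_pyRange_aux (e - 0).toNat 0 e rfl]
  by_cases h0 : e ≤ 0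
  · rw [PySem.List.pyRange_one_eq_nil (by omega), PySem.List.pyRange_one_eq_nil (by omega)]
    have : max e 0 = 0 := by omega
    simp [this]
  · have h1 : 0 < e := by omega
    have hsplit : PySem.List.pyRange 0 e 1
        = PySem.List.pyRange 0 (e-1) 1 ++ [e-1] := by
      have := PySem.List.pyRange_one_succ_right (a := 0) (b := e - 1) (by omega)
      simpa using this
    rw [hsplit]
    rw [List.map_append, List.foldl_append]
    rw [pv_fold_all (e-1) (PySem.List.pyRange 0 (e-1) 1) (fun k hk => by
      have := (PySem.List.mem_pyRange_one).1 hk; omega) count []]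
    have hlen : ((PySem.List.pyRange 0 (e-1) 1).length : Int) = e - 1 := by
      rw [PySem.List.length_pyRange_one]; omega
    simp only [List.map_cons, List.map_nil, List.foldl_cons, List.foldl_nil, hlen]
    rw [if_neg (by simp)]
    rw [Prod.ext_iff]
    constructor
    · simp; omega
    · have : count + (e - 1) = count + e - 1 := by ring
      simp [this]

-- len(range(count, count+e)) is max e 0, as an Int
theorem pv_len_range (count e : Int) :
    ((PySem.List.pyRange count (count + e) 1).length : Int) = max e 0 := by
  rw [PySem.List.length_pyRange_one]; omega

-- range(count, count+e)[:-1] is range(count, count+e-1)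
theorem pv_dropLast_range (count e : Int) :
    (PySem.List.pyRange count (count + e) 1).dropLast
      = PySem.List.pyRange count (count + e - 1) 1 := by
  by_cases h0 : e ≤ 0
  · rw [PySem.List.pyRange_one_eq_nil (by omega), PySem.List.pyRange_one_eq_nil (by omega)]
    rfl
  · have hsplit : PySem.List.pyRange count (count + e) 1
        = PySem.List.pyRange count (count + e - 1) 1 ++ [count + e - 1] := by
      have := PySem.List.pyRange_one_succ_right (a := count) (b := count + e - 1) (by omega)
      have he : count + e - 1 + 1 = count + e := by ring
      rwa [he] at this
    rw [hsplit, List.dropLast_concat]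

-- the two outer folds stay in lockstep: equal counts, flattened A-state = B-state
theorem pv_outer (no_op : List Int) (ev : List Int) :
    ∀ (s count : Int) (ils : List (List Int)) (out : List Int), ils.flatMap id = out →
      (((PySem.List.enumerate ev s).foldl
          (fun (st : Int × List (List Int)) (p : Int × Int) =>
            if ¬ (p.1 ∈ no_op) then
              (((PySem.List.enumerate (PySem.List.pyRange 0 p.2 1) 0).foldl
                  (fun (st2 : Int × List Int) (kj : Int × Int) =>
                    (st2.1 + 1, if kj.1 ≠ p.2 - 1 then st2.2 ++ [st2.1] else st2.2))
                  (st.1, [])).1,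
               st.2 ++ [((PySem.List.enumerate (PySem.List.pyRange 0 p.2 1) 0).foldl
                  (fun (st2 : Int × List Int) (kj : Int × Int) =>
                    (st2.1 + 1, if kj.1 ≠ p.2 - 1 then st2.2 ++ [st2.1] else st2.2))
                  (st.1, [])).2])
            else (st.1 + p.2, st.2))
          (count, ils)).2.flatMap id)
      = ((PySem.List.enumerate ev s).foldl
          (fun (st : Int × List Int) (p : Int × Int) =>
            if PySem.Set.contains (PySem.Set.ofList no_op) p.1 then
              (st.1 + p.2, st.2)
            else
              (st.1 + (PySem.List.pyRange st.1 (st.1 + p.2) 1).length,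
               st.2 ++ (PySem.List.pyRange st.1 (st.1 + p.2) 1).dropLast))
          (count, out)).2 := by
  induction ev with
  | nil => intro s count ils out h; simpa [PySem.List.enumerate] using h
  | cons e ev ih =>
    intro s count ils out h
    rw [PySem.List.enumerate_cons, List.foldl_cons, List.foldl_cons]
    simp only []
    rw [pv_inner e count]
    by_cases hm : s ∈ no_op
    · rw [if_neg (by simpa using hm)]
      have hc : (PySem.Set.contains (PySem.Set.ofList no_op) s) = true := by
        simp only [PySem.Set.contains_eq_listContains, List.contains_eq_mem,
          PySem.Set.mem_ofList, decide_eq_true_eq]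
        exact hm
      simp only [hc, if_true]
      exact ih (s+1) (count+e) ils out h
    · rw [if_pos (by simpa using hm)]
      have hc : (PySem.Set.contains (PySem.Set.ofList no_op) s) = false := by
        simp only [PySem.Set.contains_eq_listContains, List.contains_eq_mem,
          PySem.Set.mem_ofList, decide_eq_false_iff_not]
        exact hm
      simp only [hc, Bool.false_eq_true, if_false]
      have hlen : count + ((PySem.List.pyRange count (count + e) 1).length : Int)
          = count + max e 0 := by rw [pv_len_range]
      rw [pv_dropLast_range, hlen]
      refine ih (s+1) (count + max e 0) _ _ ?_
      simp [h]

-- ===== VERDICT (by name: the statement is the Claim_ definition above) =====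
theorem generate_index_list_spec : Claim_equal_generate_index_list := by
  intro no_op ev _
  unfold Spec_generate_index_list generate_index_list generate_index_list_alt
  exact pv_outer no_op ev 0 0 [] [] rfl
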